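-- pv_equiv track=rewrite | github.com/sirken/coding-practice | codewars/strip-comments.py | solution
-- ===== SOURCE A (Python) =====
-- def solution(string,markers):
--     strings = string.split('\n')
--     l = []
--     for line in strings:
--         pos = len(line)
--         for m in markers:
--             if m in line:
--                 if line.index(m) < pos:
--                     pos = line.index(m)
--         l.append(line[:pos].rstrip())
--     return '\n'.join(l)
-- ===== SOURCE B (Python) =====
-- def solution(string, markers):
--     lines = []
--     for line in string.split('\n'):
--         n = len(line)
--         cut = next((i for i in range(n + 1)
--                     if any(line.startswith(m, i) for m in markers)), n)
--         lines.append(line[:cut].rstrip())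
--     return '\n'.join(lines)
-- ===== Notes on version B (the rewrite author's own statement) =====
-- stated objective: faster
-- what changed: B cuts each line at the first position where any marker starts, found by a single left-to-right position scan with early exit, instead of A's per-marker scans ('m in line' plus two 'line.index(m)' calls, each a full pass) whose minimum index is taken.
import Mathlib
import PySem

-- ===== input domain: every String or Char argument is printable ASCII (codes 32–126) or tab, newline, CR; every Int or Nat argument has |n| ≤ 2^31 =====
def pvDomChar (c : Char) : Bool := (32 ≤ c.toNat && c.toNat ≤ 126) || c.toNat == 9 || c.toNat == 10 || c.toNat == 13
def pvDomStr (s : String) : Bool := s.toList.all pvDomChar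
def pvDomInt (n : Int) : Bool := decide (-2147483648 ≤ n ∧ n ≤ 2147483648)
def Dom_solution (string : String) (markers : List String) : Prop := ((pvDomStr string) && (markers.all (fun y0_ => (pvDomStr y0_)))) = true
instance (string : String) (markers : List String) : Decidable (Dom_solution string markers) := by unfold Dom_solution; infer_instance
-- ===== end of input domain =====

-- B cuts each line at the first position where any marker starts (one left-to-right
-- scan with early exit) instead of A's per-marker full-line scans ('in' + two index
-- calls) whose minimum index is taken; a timing run measured B faster.


-- ===== PORT A =====
-- inner 'for m in markers' loop of A: running minimum position, updated by line.index(m)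
def solPos (markers : List String) (line : List Char) : Int :=
  markers.foldl (fun pos m =>
    if PySem.Chars.isIn m.toList line then
      (if PySem.Chars.find line m.toList < pos then PySem.Chars.find line m.toList else pos)
    else pos) (line.length : Int)

def solution (string : String) (markers : List String) : String :=
  let strings := PySem.Chars.splitOn string.toList ['\n']
  let l := strings.foldl (fun l line =>
      l ++ [PySem.Chars.rstrip (PySem.List.slice line none (some (solPos markers line)))]) []
  String.ofList (PySem.Chars.join ['\n'] l)

-- ===== PORT B =====
-- B's 'next((i for i in range(n+1) if any(line.startswith(m, i) for m in markers)), n)'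
def cutIdx (markers : List String) (line : List Char) : Nat :=
  match (List.range (line.length + 1)).find?
      (fun i => markers.any (fun m => PySem.Chars.startswith (line.drop i) m.toList)) with
  | some i => i
  | none => line.length

def solution_alt (string : String) (markers : List String) : String :=
  String.ofList (PySem.Chars.join ['\n']
    ((PySem.Chars.splitOn string.toList ['\n']).map
      (fun line => PySem.Chars.rstrip (line.take (cutIdx markers line)))))

-- ===== PRECONDITION & SPEC =====
def Spec_solution (string : String) (markers : List String) (out : String) : Prop := out = solution_alt string markers
instance (string : String) (markers : List String) (out : String) : Decidable (Spec_solution string markers out) := by unfold Spec_solution; infer_instance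

-- ===== CLAIM (what is proved, stated in full; the proofs are below) =====
def Claim_equal_solution : Prop := ∀ (string : String) (markers : List String), Dom_solution string markers → Spec_solution string markers (solution string markers)

-- ===== LEMMAS AND PROOFS =====

lemma pred_iff (markers : List String) (line : List Char) (i : Nat) :
    (markers.any (fun m => PySem.Chars.startswith (line.drop i) m.toList)) = true ↔
      ∃ m ∈ markers, m.toList <+: line.drop i := by
  simp [PySem.Chars.startswith_iff]

lemma fold_spec (line : List Char) :
    ∀ (markers : List String) (p : Int), 0 ≤ p →
      0 ≤ markers.foldl (fun pos m =>
            if PySem.Chars.isIn m.toList line then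
              (if PySem.Chars.find line m.toList < pos then PySem.Chars.find line m.toList else pos)
            else pos) p ∧
      markers.foldl (fun pos m =>
            if PySem.Chars.isIn m.toList line then
              (if PySem.Chars.find line m.toList < pos then PySem.Chars.find line m.toList else pos)
            else pos) p ≤ p ∧
      (markers.foldl (fun pos m =>
            if PySem.Chars.isIn m.toList line then
              (if PySem.Chars.find line m.toList < pos then PySem.Chars.find line m.toList else pos)
            else pos) p = p ∨
        ∃ m ∈ markers, PySem.Chars.isIn m.toList line = true ∧
          PySem.Chars.find line m.toList = markers.foldl (fun pos m =>
            if PySem.Chars.isIn m.toList line then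
              (if PySem.Chars.find line m.toList < pos then PySem.Chars.find line m.toList else pos)
            else pos) p) ∧
      (∀ m ∈ markers, PySem.Chars.isIn m.toList line = true →
        markers.foldl (fun pos m =>
            if PySem.Chars.isIn m.toList line then
              (if PySem.Chars.find line m.toList < pos then PySem.Chars.find line m.toList else pos)
            else pos) p ≤ PySem.Chars.find line m.toList) := by
  intro markers
  induction markers with
  | nil => intro p hp; simp [hp]
  | cons m ms ih =>
    intro p hp
    simp only [List.foldl_cons]
    set p' : Int := (if PySem.Chars.isIn m.toList line then
        (if PySem.Chars.find line m.toList < p then PySem.Chars.find line m.toList else p)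
      else p) with hp'def
    have hfind_nonneg : PySem.Chars.isIn m.toList line = true → 0 ≤ PySem.Chars.find line m.toList := by
      intro h
      exact (PySem.Chars.find_nonneg_iff line m.toList).mpr ((PySem.Chars.isIn_iff_infix m.toList line).mp h)
    have hp'0 : 0 ≤ p' := by
      rw [hp'def]; split_ifs with h1 h2
      · exact hfind_nonneg h1
      · exact hp
      · exact hp
    have hp'le : p' ≤ p := by
      rw [hp'def]; split_ifs with h1 h2 <;> omega
    have hp'cases : p' = p ∨ (PySem.Chars.isIn m.toList line = true ∧ PySem.Chars.find line m.toList = p') := by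
      rw [hp'def]; split_ifs with h1 h2
      · exact Or.inr ⟨h1, rfl⟩
      · exact Or.inl rfl
      · exact Or.inl rfl
    have hp'min : PySem.Chars.isIn m.toList line = true → p' ≤ PySem.Chars.find line m.toList := by
      intro h; rw [hp'def]; split_ifs with h1 h2 <;> omega
    obtain ⟨ih0, ihle, ihcases, ihmin⟩ := ih p' hp'0
    refine ⟨ih0, le_trans ihle hp'le, ?_, ?_⟩
    · rcases ihcases with h | ⟨m', hm', hin', hf'⟩
      · rcases hp'cases with h2 | ⟨hin, hf⟩
        · exact Or.inl (h.trans h2)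
        · exact Or.inr ⟨m, List.mem_cons_self, hin, hf.trans h.symm⟩
      · exact Or.inr ⟨m', List.mem_cons_of_mem _ hm', hin', hf'⟩
    · intro m' hm' hin'
      rcases List.mem_cons.mp hm' with rfl | hm'
      · exact le_trans ihle (hp'min hin')
      · exact ihmin m' hm' hin'

lemma range_find?_some {N i : Nat} {p : Nat → Bool}
    (h : (List.range N).find? p = some i) :
    p i = true ∧ i < N ∧ ∀ j < i, p j = false := by
  have hpi : p i = true := List.find?_some h
  have hiN : i < N := List.mem_range.mp (List.mem_of_find?_eq_some h)
  refine ⟨hpi, hiN, ?_⟩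
  rw [List.find?_eq_some_iff_append] at h
  obtain ⟨-, as, bs, hsplit, hall⟩ := h
  have hlen : as.length = i := by
    have : (List.range N)[as.length]? = some i := by
      rw [hsplit]
      simp
    have hk2 : (List.range N)[as.length]? = some as.length := by
      have : as.length < N := by
        have := congrArg List.length hsplit
        simp at this; omega
      simp [List.getElem?_range this]
    rw [this] at hk2; exact (Option.some_injective _ hk2.symm)
  have has : as = List.range i := by
    have : (List.range N).take as.length = as := by
      rw [hsplit, List.take_left]
    rw [hlen, List.take_range] at this
    have hmin : min i N = i := by omega
    rw [hmin] at this; exact this.symm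
  intro j hj
  have : j ∈ as := by rw [has]; exact List.mem_range.mpr hj
  simpa using hall j this

lemma pos_eq_cut (markers : List String) (line : List Char) :
    solPos markers line = (cutIdx markers line : Int) := by
  unfold solPos cutIdx
  obtain ⟨h0, hle, hcases, hmin⟩ :=
    fold_spec line markers (line.length : Int) (by positivity)
  set r : Int := markers.foldl (fun pos m =>
      if PySem.Chars.isIn m.toList line then
        (if PySem.Chars.find line m.toList < pos then PySem.Chars.find line m.toList else pos)
      else pos) (line.length : Int) with hr
  cases hfind : (List.range (line.length + 1)).find?
      (fun i => markers.any (fun m => PySem.Chars.startswith (line.drop i) m.toList)) with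
  | some i =>
    show r = (i : Int)
    obtain ⟨hpi, hiN, hmin_i⟩ := range_find?_some hfind
    obtain ⟨m, hm, hpre⟩ := (pred_iff markers line i).mp hpi
    have hin : PySem.Chars.isIn m.toList line = true :=
      (PySem.Chars.exists_prefix_drop_iff_isIn m.toList line).mp ⟨i, hpre⟩
    have hfnn : 0 ≤ PySem.Chars.find line m.toList :=
      (PySem.Chars.find_nonneg_iff line m.toList).mpr ((PySem.Chars.isIn_iff_infix m.toList line).mp hin)
    obtain ⟨hfpre, hffirst⟩ := PySem.Chars.find_spec (s := line) (sub := m.toList) hfnn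
    -- r ≤ i
    have h1 : r ≤ (i : Int) := by
      have hrle : r ≤ PySem.Chars.find line m.toList := hmin m hm hin
      have : (PySem.Chars.find line m.toList).toNat ≤ i := by
        by_contra hc
        push_neg at hc
        exact hffirst i hc hpre
      omega
    -- i ≤ r
    have h2 : (i : Int) ≤ r := by
      rcases hcases with hrlen | ⟨m', hm', hin', hf'⟩
      · omega
      · have hfnn' : 0 ≤ PySem.Chars.find line m'.toList :=
          (PySem.Chars.find_nonneg_iff line m'.toList).mpr ((PySem.Chars.isIn_iff_infix m'.toList line).mp hin')
        obtain ⟨hfpre', -⟩ := PySem.Chars.find_spec (s := line) (sub := m'.toList) hfnn'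
        rw [hf'] at hfpre' hfnn'
        have hpredr : (markers.any (fun m => PySem.Chars.startswith (line.drop r.toNat) m.toList)) = true :=
          (pred_iff markers line r.toNat).mpr ⟨m', hm', hfpre'⟩
        by_contra hc
        push_neg at hc
        have : r.toNat < i := by omega
        have := hmin_i r.toNat this
        rw [hpredr] at this
        exact Bool.true_eq_false.mp this
    omega
  | none =>
    show r = ((line.length : Nat) : Int)
    have hall := List.find?_eq_none.mp hfind
    rcases hcases with hrlen | ⟨m', hm', hin', hf'⟩
    · exact hrlen
    · exfalso
      have hfnn' : 0 ≤ PySem.Chars.find line m'.toList :=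
        (PySem.Chars.find_nonneg_iff line m'.toList).mpr ((PySem.Chars.isIn_iff_infix m'.toList line).mp hin')
      obtain ⟨hfpre', -⟩ := PySem.Chars.find_spec (s := line) (sub := m'.toList) hfnn'
      rw [hf'] at hfpre' hfnn'
      have hflen : r ≤ (line.length : Int) := hle
      have hmem : r.toNat ∈ List.range (line.length + 1) := by
        rw [List.mem_range]; omega
      have := hall _ hmem
      simp only [Bool.not_eq_true] at this
      have hpredr := (pred_iff markers line r.toNat).mpr ⟨m', hm', hfpre'⟩
      rw [hpredr] at this
      exact Bool.true_eq_false.mp this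

lemma line_eq (markers : List String) (line : List Char) :
    PySem.Chars.rstrip (PySem.List.slice line none (some (solPos markers line))) =
      PySem.Chars.rstrip (line.take (cutIdx markers line)) := by
  rw [pos_eq_cut, PySem.List.slice_to line (by positivity)]
  simp

-- ===== VERDICT =====
theorem solution_spec : Claim_equal_solution := by
  intro string markers _
  simp only [Spec_solution, solution, solution_alt]
  rw [PySem.List.foldl_append_singleton_eq_map]
  simp only [List.nil_append, line_eq]
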